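-- pv_equiv track=rewrite | github.com/Debury/xchomo_diploma | web_api/routes/rag.py | _csv_columns
-- ===== SOURCE A (Python) =====
-- _PRIORITY_COLUMNS = [
--     "rank", "score", "source_id", "dataset_name", "variable", "long_name",
--     "standard_name", "units", "unit",
--     "time_start", "time_end", "temporal_frequency",
--     "lat_min", "lat_max", "lon_min", "lon_max",
--     "stats_mean", "stats_min", "stats_max", "stats_std",
--     "region_country", "spatial_coverage", "hazard_type", "impact_sector",
-- ]
--
-- def _csv_columns(rows: list[dict]) -> list[str]:
--     seen: set[str] = set()
--     cols: list[str] = []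
--     for c in _PRIORITY_COLUMNS:
--         if any(c in r for r in rows) and c not in seen:
--             cols.append(c)
--             seen.add(c)
--     extras = sorted({k for r in rows for k in r.keys()} - seen)
--     cols.extend(extras)
--     return cols
-- ===== SOURCE B (Python) =====
-- _PRIORITY_COLUMNS = [
--     "rank", "score", "source_id", "dataset_name", "variable", "long_name",
--     "standard_name", "units", "unit",
--     "time_start", "time_end", "temporal_frequency",
--     "lat_min", "lat_max", "lon_min", "lon_max",
--     "stats_mean", "stats_min", "stats_max", "stats_std",
--     "region_country", "spatial_coverage", "hazard_type", "impact_sector",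
-- ]
--
-- def _csv_columns(rows: list[dict]) -> list[str]:
--     keys = {k for r in rows for k in r.keys()}
--     prio = {c: i for i, c in enumerate(_PRIORITY_COLUMNS)}
--     n = len(_PRIORITY_COLUMNS)
--     return sorted(keys, key=lambda k: (prio.get(k, n), k))
-- ===== Notes on version B (the rewrite author's own statement) =====
-- stated objective: idiomatic
-- what changed: A's two phases (scan the priority list testing each column against every row with a seen-set, then append a sorted set difference) become one pass collecting the key set plus a single sorted() call with a composite (priority-index, name) key built from an enumerate dict.
import Mathlib
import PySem

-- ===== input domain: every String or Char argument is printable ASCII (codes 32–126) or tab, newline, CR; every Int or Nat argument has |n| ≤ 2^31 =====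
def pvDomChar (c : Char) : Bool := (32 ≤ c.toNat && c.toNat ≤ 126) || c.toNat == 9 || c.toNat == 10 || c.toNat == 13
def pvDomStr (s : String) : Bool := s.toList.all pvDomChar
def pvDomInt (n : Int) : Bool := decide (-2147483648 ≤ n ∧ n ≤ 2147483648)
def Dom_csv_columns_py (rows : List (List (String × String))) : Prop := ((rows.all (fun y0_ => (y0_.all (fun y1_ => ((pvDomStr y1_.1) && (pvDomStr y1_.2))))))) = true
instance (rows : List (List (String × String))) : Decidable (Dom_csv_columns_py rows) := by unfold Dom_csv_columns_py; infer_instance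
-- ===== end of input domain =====

-- B replaces A's two phases (a priority scan with a seen-set, then a sorted set difference)
-- by a single sorted() call over the key set with a composite (priority-index, name) key.

-- ===== PORT A =====
-- module constant _PRIORITY_COLUMNS
def pvPriorityColumns : List String := [
  "rank", "score", "source_id", "dataset_name", "variable", "long_name",
  "standard_name", "units", "unit",
  "time_start", "time_end", "temporal_frequency",
  "lat_min", "lat_max", "lon_min", "lon_max",
  "stats_mean", "stats_min", "stats_max", "stats_std",
  "region_country", "spatial_coverage", "hazard_type", "impact_sector"]

def csv_columns_py (rows : List (List (String × String))) : List String :=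
  -- for c in _PRIORITY_COLUMNS: if any(c in r for r in rows) and c not in seen: cols.append(c); seen.add(c)
  let sc := pvPriorityColumns.foldl
    (fun (p : PySem.Set String × List String) c =>
      if (rows.any (fun r => r.any (fun kv => kv.1 == c))) && !(PySem.Set.contains p.1 c)
      then (PySem.Set.add p.1 c, p.2 ++ [c]) else p)
    (PySem.Set.empty, [])
  -- extras = sorted({k for r in rows for k in r.keys()} - seen); cols.extend(extras)
  let extras := PySem.List.sorted
    (PySem.Set.diff (PySem.Set.ofList (rows.flatMap (fun r => r.map (·.1)))) sc.1)
    (fun x => x) false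
  sc.2 ++ extras

-- ===== PORT B =====
def csv_columns_py_alt (rows : List (List (String × String))) : List String :=
  -- keys = {k for r in rows for k in r.keys()}
  let keys : PySem.Set String := PySem.Set.ofList (rows.flatMap (fun r => r.map (·.1)))
  -- prio = {c: i for i, c in enumerate(_PRIORITY_COLUMNS)}
  let prio : PySem.Dict String Int :=
    (PySem.List.enumerate pvPriorityColumns 0).foldl (fun d p => d.insert p.2 p.1) PySem.Dict.empty
  let n : Int := pvPriorityColumns.length
  -- sorted(keys, key=lambda k: (prio.get(k, n), k)); the key is injective on the set, so set order is immaterial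
  PySem.List.sorted2 keys (fun k => prio.getD k n) (fun k => k) false

-- ===== PRECONDITION & SPEC =====
def Spec_csv_columns_py (rows : List (List (String × String))) (out : List String) : Prop := out = csv_columns_py_alt rows
instance (rows : List (List (String × String))) (out : List String) : Decidable (Spec_csv_columns_py rows out) := by unfold Spec_csv_columns_py; infer_instance

-- ===== CLAIM (what is proved, stated in full; the proofs are below) =====
def Claim_equal_csv_columns_py : Prop := ∀ (rows : List (List (String × String))), Dom_csv_columns_py rows → Spec_csv_columns_py rows (csv_columns_py rows)

-- ===== LEMMAS AND PROOFS =====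

-- abbreviations used only by the proofs
def pvKeys (rows : List (List (String × String))) : List String :=
  rows.flatMap (fun r => r.map (·.1))

def pvPrio : PySem.Dict String Int :=
  (PySem.List.enumerate pvPriorityColumns 0).foldl (fun d p => d.insert p.2 p.1) PySem.Dict.empty

def pvN : Int := pvPriorityColumns.length

-- 'any(c in r for r in rows)' is membership of c among all keys
theorem pv_any_eq_mem (rows : List (List (String × String))) (c : String) :
    (rows.any (fun r => r.any (fun kv => kv.1 == c))) = decide (c ∈ pvKeys rows) := by
  rw [Bool.eq_iff_iff]
  simp only [List.any_eq_true, decide_eq_true_eq, pvKeys, List.mem_flatMap, List.mem_map, beq_iff_eq]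

-- A's priority loop over a Nodup list starting from a seen-set fresh for the list is a filter
theorem pv_loop (q : String → Bool) :
    ∀ (l : List String) (s cs : List String), l.Nodup → (∀ c ∈ l, c ∉ s) →
    l.foldl
      (fun (p : PySem.Set String × List String) c =>
        if q c && !(PySem.Set.contains p.1 c)
        then (PySem.Set.add p.1 c, p.2 ++ [c]) else p)
      (s, cs)
    = (s ++ l.filter q, cs ++ l.filter q) := by
  intro l
  induction l with
  | nil => intro s cs _ _; simp
  | cons c t ih =>
    intro s cs hnd hfresh
    have hcs : c ∉ s := hfresh c (by simp)
    have hcont : PySem.Set.contains s c = false := by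
      rw [Bool.eq_false_iff]; intro h; exact hcs ((PySem.Set.contains_iff s c).mp h)
    rcases List.nodup_cons.mp hnd with ⟨hct, hndt⟩
    by_cases hq : q c = true
    · have hfresh' : ∀ c' ∈ t, c' ∉ s ++ [c] := by
        intro c' hc' hmem
        rcases List.mem_append.mp hmem with h | h
        · exact hfresh c' (List.mem_cons_of_mem _ hc') h
        · have hcc : c' = c := by simpa using h
          exact hct (hcc ▸ hc')
      simp only [List.foldl_cons, hq, hcont, Bool.not_false, Bool.and_true, if_true,
        PySem.Set.add_of_not_mem hcs, List.filter_cons]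
      rw [ih (s ++ [c]) (cs ++ [c]) hndt hfresh']
      simp
    · have hq' : q c = false := eq_false_of_ne_true hq
      simp only [List.foldl_cons, List.filter_cons, hq', Bool.false_and, if_false,
        Bool.false_eq_true]
      rw [ih s cs hndt (fun c' hc' => hfresh c' (List.mem_cons_of_mem _ hc'))]

-- a dict built by inserting pairs does not touch keys it never inserts
theorem pv_getD_foldl_notmem (c : String) (v : Int) :
    ∀ (l : List (Int × String)) (d : PySem.Dict String Int), c ∉ l.map (·.2) →
    (l.foldl (fun d p => d.insert p.2 p.1) d).getD c v = d.getD c v := by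
  intro l
  induction l with
  | nil => intro d _; rfl
  | cons p t ih =>
    intro d h
    simp only [List.map_cons, List.mem_cons] at h
    push Not at h
    rw [List.foldl_cons, ih _ h.2, PySem.Dict.getD_insert, if_neg h.1]

-- prio.get(c, n) for a name outside the priority list is n
theorem pv_prio_notmem (c : String) (h : c ∉ pvPriorityColumns) :
    pvPrio.getD c pvN = pvN := by
  unfold pvPrio
  rw [pv_getD_foldl_notmem c pvN _ _ (by rwa [PySem.List.map_snd_enumerate])]
  simp [PySem.Dict.empty, PySem.Dict.getD, PySem.Dict.get?]

-- priority-index keys are strictly increasing along the priority list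
theorem pv_prio_pairwise :
    pvPriorityColumns.Pairwise (fun a b => pvPrio.getD a pvN < pvPrio.getD b pvN) := by
  decide

theorem pv_prio_lt (c : String) (h : c ∈ pvPriorityColumns) : pvPrio.getD c pvN < pvN := by
  fin_cases h <;> decide

-- Python's tuple key: sorted2 is sorted under the lexicographic order on pairs
theorem pv_sorted2_eq_sorted_toLex {α : Type} (xs : List α) (k1 : α → Int) (k2 : α → String) :
    PySem.List.sorted2 xs k1 k2 false
      = PySem.List.sorted xs (fun x => toLex (k1 x, k2 x)) false := by
  unfold PySem.List.sorted2 PySem.List.sorted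
  simp only [if_neg (by decide : ¬ (false = true))]
  congr 1
  funext acc x
  congr 1
  funext a b
  rw [Bool.eq_iff_iff]
  simp only [Bool.or_eq_true, Bool.and_eq_true, Bool.not_eq_true', decide_eq_true_eq,
    decide_eq_false_iff_not, Prod.Lex.lt_iff, ofLex_toLex]
  constructor
  · rintro (h | ⟨h1, h2⟩)
    · exact Or.inl h
    · rcases lt_or_eq_of_le (not_lt.mp h1) with h' | h'
      · exact Or.inl h'
      · exact Or.inr ⟨h', h2⟩
  · rintro (h | ⟨h1, h2⟩)
    · exact Or.inl h
    · exact Or.inr ⟨not_lt.mpr (le_of_eq h1), h2⟩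

-- the main lemma: B's single composite-key sort is A's two-phase list
theorem pv_main (rows : List (List (String × String))) :
    csv_columns_py rows = csv_columns_py_alt rows := by
  have hndp : pvPriorityColumns.Nodup := by decide
  set q : String → Bool := fun c => decide (c ∈ pvKeys rows) with hq
  set P : List String := pvPriorityColumns.filter q with hP
  set keys : PySem.Set String := PySem.Set.ofList (pvKeys rows) with hkeys
  set E : List String := PySem.List.sorted (PySem.Set.diff keys P) (fun x => x) false with hE
  have hndk : keys.Nodup := PySem.Set.nodup_ofList _
  have hmemE : ∀ x, x ∈ E ↔ x ∈ keys ∧ x ∉ P := by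
    intro x; rw [hE, PySem.List.mem_sorted, PySem.Set.mem_diff]
  have hPkeys : ∀ x ∈ P, x ∈ keys := by
    intro x hx
    have := (List.mem_filter.mp hx).2
    rw [hkeys]
    exact (PySem.Set.mem_ofList _ _).mpr (by simpa [hq] using this)
  have hPpr : ∀ x ∈ P, x ∈ pvPriorityColumns := fun x hx => (List.mem_filter.mp hx).1
  have hEnpr : ∀ x ∈ E, x ∉ pvPriorityColumns := by
    intro x hx hpr
    rcases (hmemE x).mp hx with ⟨hk, hnp⟩
    exact hnp (List.mem_filter.mpr ⟨hpr, by simp [hq, ← (PySem.Set.mem_ofList (pvKeys rows) x), ← hkeys, hk]⟩)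
  have hA : csv_columns_py rows = P ++ E := by
    simp only [csv_columns_py]
    rw [pv_loop _ pvPriorityColumns PySem.Set.empty [] hndp (by simp [PySem.Set.empty])]
    rw [List.filter_congr (fun c _ => pv_any_eq_mem rows c)]
    simp only [PySem.Set.empty, List.nil_append, ← hq, ← hP]
    rw [show List.flatMap (fun r => List.map (fun x => x.1) r) rows = pvKeys rows from rfl, ← hkeys, ← hE]
  have hB : csv_columns_py_alt rows
      = PySem.List.sorted keys (fun x => toLex (pvPrio.getD x pvN, x)) false := by
    simp only [csv_columns_py_alt]
    rw [pv_sorted2_eq_sorted_toLex]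
    rfl
  rw [hA, hB]
  refine (PySem.List.sorted_eq_of_perm_of_pairwise_lt keys (P ++ E)
    (fun x => toLex (pvPrio.getD x pvN, x)) ?_ ?_).symm
  · -- P ++ E is a rearrangement of the key set
    have hndP : P.Nodup := hndp.filter q
    have hndE : E.Nodup := ((PySem.List.sorted_perm _ _ _).nodup_iff).mpr
      (PySem.Set.nodup_diff _ _ hndk)
    have hdisj : P.Disjoint E := by
      intro x hxP hxE
      exact ((hmemE x).mp hxE).2 hxP
    have hnd : (P ++ E).Nodup := hndP.append hndE hdisj
    rw [List.perm_ext_iff_of_nodup hnd hndk]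
    intro a
    constructor
    · intro ha
      rcases List.mem_append.mp ha with h | h
      · exact hPkeys a h
      · exact ((hmemE a).mp h).1
    · intro ha
      by_cases hp : a ∈ P
      · exact List.mem_append.mpr (Or.inl hp)
      · exact List.mem_append.mpr (Or.inr ((hmemE a).mpr ⟨ha, hp⟩))
  · -- P ++ E is strictly increasing under the composite key
    rw [List.pairwise_append]
    refine ⟨?_, ?_, ?_⟩
    · exact (pv_prio_pairwise.filter q).imp
        (fun h => Prod.Lex.lt_iff.mpr (Or.inl (by simpa using h)))
    · have h1 : E.Pairwise (fun a b => a ≤ b) := by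
        rw [hE]; exact PySem.List.sorted_pairwise _ _
      have h2 : E.Pairwise (fun a b => a ≠ b) := ((PySem.List.sorted_perm _ _ _).nodup_iff).mpr
        (PySem.Set.nodup_diff _ _ hndk)
      refine (h1.and h2).imp_of_mem ?_
      intro a b ha hb hab
      refine Prod.Lex.lt_iff.mpr (Or.inr ?_)
      simp only [ofLex_toLex]
      rw [pv_prio_notmem a (hEnpr a ha), pv_prio_notmem b (hEnpr b hb)]
      exact ⟨rfl, lt_of_le_of_ne hab.1 hab.2⟩
    · intro a ha b hb
      refine Prod.Lex.lt_iff.mpr (Or.inl ?_)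
      simp only [ofLex_toLex]
      rw [pv_prio_notmem b (hEnpr b hb)]
      exact pv_prio_lt a (hPpr a ha)

-- ===== VERDICT (by name: the statement is the Claim_ definition above) =====
theorem csv_columns_py_spec : Claim_equal_csv_columns_py := by
  intro rows _
  unfold Spec_csv_columns_py
  exact pv_main rows
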